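-- pv_equiv track=rewrite | github.com/elma-cord/job-data-extractor | validators.py | normalize_seniority_list
-- ===== SOURCE A (Python) =====
-- from typing import Dict, List
--
-- def normalize_seniority_list(values: List[str]) -> List[str]:
--     order = ["entry", "junior", "mid", "senior", "lead", "leadership"]
--     found = []
--     for v in values:
--         low = str(v).strip().lower()
--         if low in order and low not in found:
--             found.append(low)
--     return [x for x in order if x in found][:3]
-- ===== SOURCE B (Python) =====
-- def normalize_seniority_list(values):
--     result = []
--     for label in ["entry", "junior", "mid", "senior", "lead", "leadership"]:
--         if len(result) == 3:
--             break
--         if any(str(v).strip().lower() == label for v in values):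
--             result.append(label)
--     return result
-- ===== Notes on version B (the rewrite author's own statement) =====
-- stated objective: alternative
-- what changed: Inverts the loop structure: instead of scanning values while maintaining a deduplicating accumulator and then reordering/truncating, B iterates over the six canonical labels in order, probes values with any() for each, and breaks as soon as three labels are collected; no dedup state over values exists.
import Mathlib
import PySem

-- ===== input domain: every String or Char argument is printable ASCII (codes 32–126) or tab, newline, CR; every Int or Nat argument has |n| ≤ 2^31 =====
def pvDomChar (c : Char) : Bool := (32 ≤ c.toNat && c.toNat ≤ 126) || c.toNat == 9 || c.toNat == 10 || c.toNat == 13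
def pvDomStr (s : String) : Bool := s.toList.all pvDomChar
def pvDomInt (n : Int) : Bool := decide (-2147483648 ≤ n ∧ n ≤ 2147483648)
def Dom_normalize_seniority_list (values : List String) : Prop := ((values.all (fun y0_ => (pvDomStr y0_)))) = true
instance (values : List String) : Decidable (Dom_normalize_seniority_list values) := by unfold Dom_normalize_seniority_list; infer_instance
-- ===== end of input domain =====

-- B inverts the loops: it walks the six canonical labels in order, probes values with any(),
-- and stops once three labels are collected — no dedup accumulator over values (objective: alternative).

-- ===== PORT A =====
-- A: loop over values collecting canonical labels first-seen deduped; then reorder by `order`, take 3.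
def normalize_seniority_list (values : List String) : List String :=
  let found := values.foldl (fun found v =>
    let low := PySem.Str.lower (PySem.Str.strip v)
    if (["entry", "junior", "mid", "senior", "lead", "leadership"] : List String).contains low
        && !(found.contains low) then found ++ [low] else found) []
  ((["entry", "junior", "mid", "senior", "lead", "leadership"] : List String).filter
    (fun x => found.contains x)).take 3

-- ===== PORT B =====
-- B's loop over the canonical labels with early break at three collected labels.
def nslAltLoop (values : List String) : List String → List String → List String
  | [], result => result
  | label :: rest, result =>
      if result.length == 3 then result
      else if values.any (fun v => PySem.Str.lower (PySem.Str.strip v) == label) then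
        nslAltLoop values rest (result ++ [label])
      else
        nslAltLoop values rest result

def normalize_seniority_list_alt (values : List String) : List String :=
  nslAltLoop values ["entry", "junior", "mid", "senior", "lead", "leadership"] []

-- ===== PRECONDITION & SPEC =====
def Spec_normalize_seniority_list (values : List String) (out : List String) : Prop := out = normalize_seniority_list_alt values
instance (values : List String) (out : List String) : Decidable (Spec_normalize_seniority_list values out) := by unfold Spec_normalize_seniority_list; infer_instance

-- ===== CLAIM (what is proved, stated in full; the proofs are below) =====
def Claim_equal_normalize_seniority_list : Prop := ∀ (values : List String), Dom_normalize_seniority_list values → Spec_normalize_seniority_list values (normalize_seniority_list values)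

-- ===== LEMMAS AND PROOFS =====

-- Membership in A's accumulator: x is collected iff it was already there, or it is canonical
-- and some value normalizes to x (stated for an arbitrary normalizer g).
theorem mem_found (g : String → String) (order : List String) (vs : List String) :
    ∀ (acc : List String) (x : String),
      (x ∈ vs.foldl (fun found v =>
          let low := g v
          if order.contains low && !(found.contains low) then found ++ [low] else found) acc)
        ↔ x ∈ acc ∨ (x ∈ order ∧ x ∈ vs.map g) := by
  induction vs with
  | nil => simp
  | cons v vs ih =>
      intro acc x
      simp only [List.foldl_cons, List.map_cons, List.mem_cons]
      by_cases h1 : order.contains (g v) = true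
      · have h1' : g v ∈ order := List.contains_iff_mem.mp h1
        by_cases h2 : acc.contains (g v) = true
        · have h2' : g v ∈ acc := List.contains_iff_mem.mp h2
          rw [if_neg (by rw [h1, h2]; simp), ih]
          constructor
          · tauto
          · rintro (hx | ⟨hxo, he | hm⟩)
            · exact Or.inl hx
            · exact Or.inl (he ▸ h2')
            · exact Or.inr ⟨hxo, hm⟩
        · have h2' : g v ∉ acc := by simpa using h2
          rw [if_pos (by simp [h1', h2']), ih]
          simp only [List.mem_append, List.mem_singleton]
          constructor
          · rintro ((hx | he) | ⟨hxo, hm⟩)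
            · exact Or.inl hx
            · exact Or.inr ⟨he ▸ h1', Or.inl he⟩
            · exact Or.inr ⟨hxo, Or.inr hm⟩
          · rintro (hx | ⟨hxo, he | hm⟩)
            · exact Or.inl (Or.inl hx)
            · exact Or.inl (Or.inr he)
            · exact Or.inr ⟨hxo, hm⟩
      · have h1' : g v ∉ order := by simpa using h1
        rw [if_neg (by simp [h1']), ih]
        constructor
        · tauto
        · rintro (hx | ⟨hxo, he | hm⟩)
          · exact Or.inl hx
          · exact absurd (he ▸ hxo) h1'
          · exact Or.inr ⟨hxo, hm⟩

-- B's loop with accumulator res (|res| ≤ 3) is res ++ the filtered remainder truncated to the room left.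
theorem nslAltLoop_eq (values : List String) (ord : List String) :
    ∀ (res : List String), res.length ≤ 3 →
      nslAltLoop values ord res
        = res ++ ((ord.filter (fun x => values.any (fun v => PySem.Str.lower (PySem.Str.strip v) == x))).take (3 - res.length)) := by
  induction ord with
  | nil => intro res _; simp [nslAltLoop]
  | cons label rest ih =>
      intro res hle
      unfold nslAltLoop
      by_cases h3 : res.length = 3
      · simp [h3]
      · have hlt : res.length < 3 := lt_of_le_of_ne hle h3
        rw [if_neg (by simpa using h3)]
        by_cases hp : values.any (fun v => PySem.Str.lower (PySem.Str.strip v) == label) = true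
        · rw [if_pos hp, ih (res ++ [label]) (by simp; omega)]
          simp only [List.filter_cons, hp, if_true]
          rw [List.take_cons (by omega)]
          have hnum : 3 - (res ++ [label]).length = 3 - res.length - 1 := by simp; omega
          rw [hnum]
          simp [List.append_assoc]
        · rw [if_neg hp, ih res hle]
          simp [hp]

-- ===== VERDICT =====
theorem normalize_seniority_list_spec : Claim_equal_normalize_seniority_list := by
  intro values _
  unfold Spec_normalize_seniority_list normalize_seniority_list normalize_seniority_list_alt
  rw [nslAltLoop_eq values _ [] (by simp)]
  simp only [List.nil_append, List.length_nil, Nat.sub_zero]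
  refine congrArg (List.take 3) (List.filter_congr ?_)
  intro x hx
  rw [Bool.eq_iff_iff, List.contains_iff_mem,
    mem_found (fun v => PySem.Str.lower (PySem.Str.strip v))
      (["entry", "junior", "mid", "senior", "lead", "leadership"] : List String) values [] x]
  simp only [List.not_mem_nil, false_or, List.any_eq_true, beq_iff_eq, List.mem_map]
  constructor
  · rintro ⟨_, v, hv, he⟩; exact ⟨v, hv, he⟩
  · rintro ⟨v, hv, he⟩; exact ⟨hx, v, hv, he⟩
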